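-- pv_equiv track=rewrite | github.com/anonymous-ml-code/proc_005 | wimbledon.py | count_champions
-- ===== SOURCE A (Python) =====
-- def count_champions(data):
--     """Count how many times each champion has won Wimbledon."""
--     champion_counts = {}
--     for row in data:
--         champion = row[2]  # Champion is in the 3rd column
--         if champion in champion_counts:
--             champion_counts[champion] += 1
--         else:
--             champion_counts[champion] = 1
--     return champion_counts
-- ===== SOURCE B (Python) =====
-- def count_champions(data):
--     """Count how many times each champion has won Wimbledon."""
--     champions = [row[2] for row in data]
--     return {c: champions.count(c) for c in dict.fromkeys(champions)}
-- ===== Notes on version B (the rewrite author's own statement) =====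
-- stated objective: alternative
-- what changed: Replaces the incremental dict-increment loop with a two-phase decomposition: extract the champion column, dedup it in first-occurrence order, then count each distinct champion with list.count.
import Mathlib
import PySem

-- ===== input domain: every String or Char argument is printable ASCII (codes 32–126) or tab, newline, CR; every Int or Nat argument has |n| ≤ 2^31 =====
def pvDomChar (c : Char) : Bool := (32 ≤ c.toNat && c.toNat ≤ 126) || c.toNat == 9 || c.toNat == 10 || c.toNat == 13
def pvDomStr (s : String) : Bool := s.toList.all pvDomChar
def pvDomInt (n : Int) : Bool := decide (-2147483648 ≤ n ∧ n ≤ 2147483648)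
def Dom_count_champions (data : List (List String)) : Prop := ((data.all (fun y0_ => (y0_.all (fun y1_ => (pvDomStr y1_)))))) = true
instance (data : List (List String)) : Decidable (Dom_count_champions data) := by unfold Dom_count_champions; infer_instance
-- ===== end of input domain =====

-- B replaces A's incremental dict-increment loop by: extract the champion column, dedup it
-- in first-occurrence order, then count each distinct champion with list.count (alternative decomposition).

-- ===== PORT A =====
-- row[2] is ported as (pyGet? row 2).getD ""; Pre_ guarantees the index is in range (Python raises IndexError otherwise).
def count_champions (data : List (List String)) : List (String × Int) :=
  (data.foldl (fun champion_counts row =>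
      let champion := (PySem.List.pyGet? row 2).getD ""
      if champion_counts.contains champion then
        champion_counts.modify champion 0 (· + 1)
      else
        champion_counts.insert champion 1)
    PySem.Dict.empty).items

-- ===== PORT B =====
def count_champions_alt (data : List (List String)) : List (String × Int) :=
  let champions := data.map (fun row => (PySem.List.pyGet? row 2).getD "")
  ((PySem.List.dedup champions).foldl
      (fun d c => d.insert c ((champions.count c : Int)))
    PySem.Dict.empty).items

-- ===== PRECONDITION & SPEC =====
-- A raises IndexError when some row has fewer than 3 entries; exactly those inputs are excluded.
def Pre_count_champions (data : List (List String)) : Prop :=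
  ∀ row ∈ data, 3 ≤ row.length
instance (data : List (List String)) : Decidable (Pre_count_champions data) := by
  unfold Pre_count_champions; infer_instance

def pvWitness_count_champions : List (List String) :=
  [["2001", "Rafter", "Ivanisevic"], ["2002", "Nalbandian", "Hewitt"]]

def Spec_count_champions (data : List (List String)) (out : List (String × Int)) : Prop := out = count_champions_alt data
instance (data : List (List String)) (out : List (String × Int)) : Decidable (Spec_count_champions data out) := by unfold Spec_count_champions; infer_instance

-- ===== CLAIM (what is proved, stated in full; the proofs are below) =====
def Claim_equal_count_champions : Prop := ∀ (data : List (List String)), Dom_count_champions data → Pre_count_champions data → Spec_count_champions data (count_champions data)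

-- ===== LEMMAS AND PROOFS =====

-- A's loop body equals Counter's unconditional modify step.
lemma step_eq_modify (d : PySem.Dict String Int) (c : String) :
    (if d.contains c then d.modify c 0 (· + 1) else d.insert c 1)
      = d.modify c 0 (· + 1) := by
  by_cases h : d.contains c = true
  · simp [h]
  · simp only [Bool.not_eq_true] at h
    rw [if_neg (by simp [h]), PySem.Dict.modify, PySem.Dict.getD_of_not_contains d 0 h]
    norm_num

-- A's dict is Counter(champions).
lemma a_fold_eq_counter (data : List (List String)) :
    (data.foldl (fun champion_counts row =>
        let champion := (PySem.List.pyGet? row 2).getD ""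
        if champion_counts.contains champion then
          champion_counts.modify champion 0 (· + 1)
        else
          champion_counts.insert champion 1)
      PySem.Dict.empty)
      = PySem.Dict.counter (data.map (fun row => (PySem.List.pyGet? row 2).getD "")) := by
  rw [PySem.Dict.counter_eq_foldl, List.foldl_map]
  simp only [step_eq_modify]

-- B's fold inserts each distinct key once, so its items list is the mapped dedup list.
lemma b_items (champs : List String) :
    ((PySem.List.dedup champs).foldl
        (fun d c => d.insert c ((champs.count c : Int))) PySem.Dict.empty).items
      = (PySem.List.dedup champs).map (fun c => (c, (champs.count c : Int))) := by
  have h := PySem.Dict.items_foldl_insert_fresh (PySem.List.dedup champs) id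
      (fun c => (champs.count c : Int)) PySem.Dict.empty
      (fun a _ => by simp)
      (by simpa using PySem.List.nodup_dedup champs)
  simp at h; exact h

-- ===== VERDICT (by name: the statement is the Claim_ definition above) =====
theorem count_champions_spec : Claim_equal_count_champions := by
  intro data _ _
  show _ = _
  rw [count_champions, count_champions_alt, a_fold_eq_counter, PySem.Dict.items_counter, b_items]
  simp
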